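-- pv_equiv track=rewrite | github.com/sebastianval22/school-projects | Advanced Programming Projects/T0/functions.py | verificar_alcance_todas_bombas
-- ===== SOURCE A (Python) =====
-- def verificar_alcance_bomba(tablero: list, coordenada: tuple) -> int:  # Regla1
--     fila = coordenada[0]
--     columna = coordenada[1]
--     posible_bomba = str(tablero[fila][columna])
--     if posible_bomba.isdigit() is False:
--         return (0)
--     else:
--         contador = 1
--         # vertical_arriba
--         for i in range(1, len(tablero)):
--             if (fila - i) >= 0:
--                 posicion = tablero[fila - i][columna]
--                 if posicion != "T":
--                     contador += 1
--                 else: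
--                     break
--         # vertical_abajo
--         for i in range(1, len(tablero)):
--             if (fila + i) < len(tablero):
--                 posicion = tablero[fila + i][columna]
--                 if posicion != "T":
--                     contador += 1
--                 else:
--                     break
--         # horizontal_derecha
--         for i in range(1, len(tablero)):
--             if (columna + i) < len(tablero):
--                 posicion = tablero[fila][columna + i]
--                 if posicion != "T":
--                     contador += 1
--                 else:
--                     break
--         # horizontal_izquierda
--         for i in range(1, len(tablero)):
--             if (columna - i) >= 0:
--                 posicion = tablero[fila][columna - i]
--                 if posicion != "T":
--                     contador += 1
--                 else:
--                     break
--     return contador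
--
-- def verificar_alcance_todas_bombas(tablero: list) -> bool:    # Regla 1,
--     for i in range(0, len(tablero)):        # para todas las bombas del tablero
--         for j in range(0, len(tablero[0])):
--             posicion_actual = str(tablero[i][j])
--             if posicion_actual.isdigit() is True:
--                 numero_bomba = int(posicion_actual)
--                 alcance_calculado = verificar_alcance_bomba(tablero, (i, j))
--                 if alcance_calculado != numero_bomba:
--                     return False
--     return True
-- ===== SOURCE B (Python) =====
-- def verificar_alcance_todas_bombas(tablero: list) -> bool:
--     n = len(tablero)
--     if n == 0:
--         return True
--     m = len(tablero[0])
--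
--     def runs_before(cells):
--         # runs_before(cells)[k] = number of consecutive non-"T" cells immediately before index k
--         res = []
--         c = 0
--         for x in cells:
--             res.append(c)
--             c = 0 if x == "T" else c + 1
--         return res
--
--     rows = [fila[:m] for fila in tablero]
--     cols = [[rows[i][j] for i in range(n)] for j in range(m)]
--     L = [runs_before(r) for r in rows]
--     R = [runs_before(r[::-1])[::-1] for r in rows]
--     U = [runs_before(c) for c in cols]
--     D = [runs_before(c[::-1])[::-1] for c in cols]
--     return all(
--         int(rows[i][j]) == 1 + L[i][j] + R[i][j] + U[j][i] + D[j][i]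
--         for i in range(n) for j in range(m) if rows[i][j].isdigit()
--     )
-- ===== Notes on version B (the rewrite author's own statement) =====
-- stated objective: alternative
-- what changed: Replaces A's per-bomb four directional rescans (one O(n) scan per direction per digit cell, O(n^3) worst case) by four precomputed run-length tables (consecutive non-'T' cells before each position along rows and columns, each built in one pass), so each cell's cross reach is 1 plus four table lookups; B checks all cells against the tables instead of rescanning.
-- outside the precondition, e.g. on verificar_alcance_todas_bombas([['2', '2']]): A returns False, B returns True
import Mathlib
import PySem

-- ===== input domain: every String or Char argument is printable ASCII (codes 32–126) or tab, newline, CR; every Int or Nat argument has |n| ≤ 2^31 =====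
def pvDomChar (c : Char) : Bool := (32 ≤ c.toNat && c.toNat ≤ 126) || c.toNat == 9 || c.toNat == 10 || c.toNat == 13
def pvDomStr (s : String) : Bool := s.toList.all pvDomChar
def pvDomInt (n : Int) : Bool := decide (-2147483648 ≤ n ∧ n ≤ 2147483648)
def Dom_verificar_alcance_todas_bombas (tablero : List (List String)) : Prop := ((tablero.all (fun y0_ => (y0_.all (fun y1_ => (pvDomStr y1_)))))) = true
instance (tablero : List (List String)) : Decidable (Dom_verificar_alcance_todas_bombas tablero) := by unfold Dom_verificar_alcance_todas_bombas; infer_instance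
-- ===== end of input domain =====

-- B replaces A's per-bomb directional rescans by four one-pass run-length tables (reach = 1 + four O(1) lookups).

-- ===== PORT A =====
-- tablero[i][j] (both indices Python semantics; in-range everywhere A is run inside Pre_)
def pvCell (tablero : List (List String)) (i j : Int) : String :=
  (PySem.List.pyGet? ((PySem.List.pyGet? tablero i).getD []) j).getD ""

-- the four 'for i in range(1, len(tablero))' loops of verificar_alcance_bomba, with their break
def bombaUp (tablero : List (List String)) (fila columna : Int) : List Int → Int → Int
  | [], contador => contador
  | i :: rest, contador =>
    if fila - i ≥ 0 then
      if pvCell tablero (fila - i) columna ≠ "T" then bombaUp tablero fila columna rest (contador + 1)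
      else contador
    else bombaUp tablero fila columna rest contador

def bombaDown (tablero : List (List String)) (fila columna : Int) : List Int → Int → Int
  | [], contador => contador
  | i :: rest, contador =>
    if fila + i < (tablero.length : Int) then
      if pvCell tablero (fila + i) columna ≠ "T" then bombaDown tablero fila columna rest (contador + 1)
      else contador
    else bombaDown tablero fila columna rest contador

def bombaRight (tablero : List (List String)) (fila columna : Int) : List Int → Int → Int
  | [], contador => contador
  | i :: rest, contador =>
    if columna + i < (tablero.length : Int) then
      if pvCell tablero fila (columna + i) ≠ "T" then bombaRight tablero fila columna rest (contador + 1)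
      else contador
    else bombaRight tablero fila columna rest contador

def bombaLeft (tablero : List (List String)) (fila columna : Int) : List Int → Int → Int
  | [], contador => contador
  | i :: rest, contador =>
    if columna - i ≥ 0 then
      if pvCell tablero fila (columna - i) ≠ "T" then bombaLeft tablero fila columna rest (contador + 1)
      else contador
    else bombaLeft tablero fila columna rest contador

def verificar_alcance_bomba (tablero : List (List String)) (coordenada : Int × Int) : Int :=
  let fila := coordenada.1
  let columna := coordenada.2
  let posible_bomba := pvCell tablero fila columna
  if PySem.Str.strIsdigit posible_bomba = false then 0
  else
    let r := PySem.List.pyRange 1 (tablero.length : Int) 1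
    let c1 := bombaUp tablero fila columna r 1
    let c2 := bombaDown tablero fila columna r c1
    let c3 := bombaRight tablero fila columna r c2
    bombaLeft tablero fila columna r c3

-- inner 'for j in range(0, len(tablero[0]))' with its early 'return False'
def vatbRow (tablero : List (List String)) (i : Int) : List Int → Bool
  | [] => true
  | j :: rest =>
    let posicion_actual := pvCell tablero i j
    if PySem.Str.strIsdigit posicion_actual = true then
      let numero_bomba := (PySem.Int.ofStr? posicion_actual).getD 0
      let alcance_calculado := verificar_alcance_bomba tablero (i, j)
      if alcance_calculado ≠ numero_bomba then false else vatbRow tablero i rest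
    else vatbRow tablero i rest

def vatbRows (tablero : List (List String)) : List Int → Bool
  | [] => true
  | i :: rest =>
    if vatbRow tablero i (PySem.List.pyRange 0 ((((PySem.List.pyGet? tablero 0).getD []).length : Int)) 1)
    then vatbRows tablero rest
    else false

def verificar_alcance_todas_bombas (tablero : List (List String)) : Bool :=
  vatbRows tablero (PySem.List.pyRange 0 (tablero.length : Int) 1)

-- ===== PORT B =====
-- runs_before of Source B: element k = number of consecutive non-"T" cells immediately before index k
def runsBefore : List String → Int → List Int
  | [], _ => []
  | x :: xs, c => c :: runsBefore xs (if x = "T" then 0 else c + 1)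

def verificar_alcance_todas_bombas_alt (tablero : List (List String)) : Bool :=
  let n := tablero.length
  if n = 0 then true
  else
    let m := (tablero.headD []).length
    let rows := tablero.map (fun fila => PySem.List.slice fila none (some (m : Int)))
    let cols := (List.range m).map (fun j => (List.range n).map (fun i => ((rows.getD i []).getD j "")))
    let L := rows.map (fun r => runsBefore r 0)
    let R := rows.map (fun r => (runsBefore r.reverse 0).reverse)
    let U := cols.map (fun c => runsBefore c 0)
    let D := cols.map (fun c => (runsBefore c.reverse 0).reverse)
    (List.range n).all (fun i => (List.range m).all (fun j =>
      let s := (rows.getD i []).getD j ""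
      !(PySem.Str.strIsdigit s) ||
        ((PySem.Int.ofStr? s).getD 0
          == 1 + ((L.getD i []).getD j 0) + ((R.getD i []).getD j 0)
              + ((U.getD j []).getD i 0) + ((D.getD j []).getD i 0))))

-- ===== PRECONDITION & SPEC =====
-- Pre_ restricts to the game's natural domain, square boards (every row as long as the board is tall),
-- plus boards without any digit cell (on which both programs trivially answer True provided no row is
-- shorter than row 0, which would make A raise IndexError). It excludes non-square boards containing a
-- digit: there A still returns a value, but its horizontal scans are truncated at len(tablero) instead of
-- the row length, an artefact of A's loop bounds that only square boards were meant to meet.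
def Pre_verificar_alcance_todas_bombas (tablero : List (List String)) : Prop :=
  (∀ fila ∈ tablero, fila.length = tablero.length) ∨
  ((∀ fila ∈ tablero, (tablero.headD []).length ≤ fila.length) ∧
   (∀ fila ∈ tablero, ∀ s ∈ fila, PySem.Str.strIsdigit s = false))
instance (tablero : List (List String)) : Decidable (Pre_verificar_alcance_todas_bombas tablero) := by
  unfold Pre_verificar_alcance_todas_bombas; infer_instance

def pvWitness_verificar_alcance_todas_bombas : List (List String) :=
  [["3", "x", "T"], ["y", "T", "z"], ["1", "T", "w"]]

def Spec_verificar_alcance_todas_bombas (tablero : List (List String)) (out : Bool) : Prop := out = verificar_alcance_todas_bombas_alt tablero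
instance (tablero : List (List String)) (out : Bool) : Decidable (Spec_verificar_alcance_todas_bombas tablero out) := by unfold Spec_verificar_alcance_todas_bombas; infer_instance

-- ===== CLAIM (what is proved, stated in full; the proofs are below) =====
def Claim_equal_verificar_alcance_todas_bombas : Prop := ∀ (tablero : List (List String)), Dom_verificar_alcance_todas_bombas tablero → Pre_verificar_alcance_todas_bombas tablero → Spec_verificar_alcance_todas_bombas tablero (verificar_alcance_todas_bombas tablero)

-- ===== LEMMAS AND PROOFS =====

-- notation for the proofs: the j-th column of the board, read through default-"" indexing
def pvColumn (tablero : List (List String)) (j : Nat) : List String :=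
  tablero.map (fun r => r.getD j "")

def pvNotT (s : String) : Bool := s ≠ "T"

-- the per-cell check A's inner loop performs
def pvPA (t : List (List String)) (i j : Int) : Bool :=
  !(PySem.Str.strIsdigit (pvCell t i j)) ||
    (verificar_alcance_bomba t (i, j) == (PySem.Int.ofStr? (pvCell t i j)).getD 0)

theorem pvColumn_length (t : List (List String)) (j : Nat) : (pvColumn t j).length = t.length := by
  simp [pvColumn]

theorem take_rev_cons {α} [Inhabited α] (l : List α) (k : Nat) (hk : k < l.length) :
    (l.take (k+1)).reverse = l[k] :: (l.take k).reverse := by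
  rw [List.take_add_one]
  simp [List.getElem?_eq_getElem hk]

theorem pvTakeWhile_append (p : String → Bool) (l l2 : List String) :
    List.takeWhile p (l ++ l2) = if l.all p then l ++ List.takeWhile p l2 else List.takeWhile p l := by
  induction l with
  | nil => simp
  | cons x xs ih => by_cases h : p x <;> simp [h, ih] <;> split <;> simp

theorem runsBefore_length (cells : List String) (c : Int) :
    (runsBefore cells c).length = cells.length := by
  induction cells generalizing c with
  | nil => rfl
  | cons x xs ih => simp [runsBefore, ih]

theorem runsBefore_getD (cells : List String) (c : Int) (k : Nat) (hk : k < cells.length) :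
    (runsBefore cells c).getD k 0 =
      (if (cells.take k).all pvNotT then c + k
       else (((cells.take k).reverse).takeWhile pvNotT).length) := by
  induction cells generalizing c k with
  | nil => simp at hk
  | cons x xs ih =>
    cases k with
    | zero => simp [runsBefore]
    | succ k =>
      simp only [List.length_cons, Nat.add_lt_add_iff_right] at hk
      simp only [runsBefore, List.getD_cons_succ]
      rw [ih _ k hk]
      by_cases hx : x = "T"
      · have hpx : pvNotT x = false := by simp [pvNotT, hx]
        simp only [hx, List.take_succ_cons, List.reverse_cons,
          pvTakeWhile_append, List.all_cons, List.all_reverse]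
        split
        · rename_i h
          simp [h, pvNotT, List.length_take, Nat.min_eq_left (Nat.le_of_lt hk)]
        · rename_i h
          simp [h]
      · have hpx : pvNotT x = true := by simp [pvNotT, hx]
        simp only [if_neg hx, List.take_succ_cons, List.reverse_cons,
          pvTakeWhile_append, List.all_cons, hpx, Bool.true_and, List.all_reverse]
        split
        · rename_i h
          simp [h]; omega
        · rename_i h
          simp [h]

theorem runsBefore_getD_zero (cells : List String) (k : Nat) (hk : k < cells.length) :
    (runsBefore cells 0).getD k 0 = ((((cells.take k).reverse).takeWhile pvNotT).length : Int) := by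
  rw [runsBefore_getD cells 0 k hk]
  split
  · rename_i h
    have he : ((cells.take k).reverse).takeWhile pvNotT = (cells.take k).reverse := by
      apply List.takeWhile_eq_self_iff.mpr
      intro x hx
      exact List.all_eq_true.mp h x (List.mem_reverse.mp hx)
    rw [he]
    simp [List.length_take, Nat.min_eq_left (Nat.le_of_lt hk)]
  · rfl

theorem pvCell_natCast (t : List (List String)) (i j : Nat) (hi : i < t.length) :
    pvCell t (i : Int) (j : Int) = (pvColumn t j)[i]'(by rw [pvColumn_length]; exact hi) := by
  unfold pvCell pvColumn
  rw [PySem.List.pyGet?_ofNat t i hi]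
  simp [pysem, List.getD_eq_getElem?_getD, List.getElem?_eq_getElem hi]

theorem pvCell_row (t : List (List String)) (f j : Nat) (row : List String)
    (hget : t[f]? = some row) (hj : j < row.length) :
    pvCell t (f : Int) (j : Int) = row[j]'hj := by
  have hf : f < t.length := by
    rcases List.getElem?_eq_some_iff.mp hget with ⟨h, _⟩; exact h
  unfold pvCell
  rw [PySem.List.pyGet?_ofNat t f hf]
  have hrow : t[f] = row := by
    have he := List.getElem?_eq_getElem hf
    rw [he] at hget; exact Option.some_injective _ hget
  simp only [Option.getD_some, hrow]
  rw [PySem.List.pyGet?_ofNat row j hj]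
  rfl

theorem bombaUp_spec (t : List (List String)) (f j : Nat) (hf : f < t.length) :
    ∀ a : Nat, 1 ≤ a → a ≤ t.length → ∀ acc : Int,
      bombaUp t (f : Int) (j : Int) (PySem.List.pyRange (a : Int) (t.length : Int) 1) acc =
        acc + (((((pvColumn t j).take (f + 1 - a)).reverse).takeWhile pvNotT).length : Int) := by
  intro a
  induction h : t.length - a generalizing a with
  | zero =>
    intro h1 hle acc
    have ha : a = t.length := by omega
    have hr : PySem.List.pyRange (a : Int) (t.length : Int) 1 = [] := by
      rw [ha]; simp [pysem]
    rw [hr]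
    have h0 : f + 1 - a = 0 := by omega
    simp [bombaUp, h0]
  | succ m ih =>
    intro h1 hle acc
    have hlt : a < t.length := by omega
    rw [PySem.List.pyRange_one_cons (by exact_mod_cast hlt)]
    simp only [bombaUp]
    by_cases haf : a ≤ f
    · rw [if_pos (by push_cast; omega)]
      have hfa : (f : Int) - (a : Int) = ((f - a : Nat) : Int) := by push_cast; omega
      have hcl : f - a < (pvColumn t j).length := by rw [pvColumn_length]; omega
      rw [hfa, pvCell_natCast t (f-a) j (by omega)]
      have hfa2 : f + 1 - a = (f - a) + 1 := by omega
      rw [hfa2, take_rev_cons _ _ hcl]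
      by_cases hT : (pvColumn t j)[f-a]'hcl = "T"
      · rw [if_neg (by simp only [ne_eq, not_not]; exact hT)]
        simp [hT, List.takeWhile_cons, pvNotT]
      · rw [if_pos (by simp only [ne_eq]; exact hT)]
        have hih := ih (a+1) (by omega) (by omega) (by omega) (acc + 1)
        push_cast at hih ⊢
        rw [hih]
        have hfa3 : f + 1 - (a + 1) = f - a := by omega
        simp only [hfa3] at *
        simp [List.takeWhile_cons, pvNotT, hT]
        push_cast
        omega
    · rw [if_neg (by push_cast; omega)]
      have hih := ih (a+1) (by omega) (by omega) (by omega) acc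
      push_cast at hih ⊢
      rw [hih]
      have e0 : f - a = 0 := by omega
      have e1 : f + 1 - (a + 1) = 0 := by omega
      have e2 : f + 1 - a = 0 := by omega
      simp only [e0, e1, e2]

theorem bombaDown_spec (t : List (List String)) (f j : Nat) (hf : f < t.length) :
    ∀ a : Nat, 1 ≤ a → a ≤ t.length → ∀ acc : Int,
      bombaDown t (f : Int) (j : Int) (PySem.List.pyRange (a : Int) (t.length : Int) 1) acc =
        acc + ((((pvColumn t j).drop (f + a)).takeWhile pvNotT).length : Int) := by
  intro a
  induction h : t.length - a generalizing a with
  | zero =>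
    intro h1 hle acc
    have hr : PySem.List.pyRange (a : Int) (t.length : Int) 1 = [] := by
      have ha : a = t.length := by omega
      rw [ha]; simp [pysem]
    rw [hr]
    have h0 : (pvColumn t j).drop (f + a) = [] := by
      apply List.drop_eq_nil_of_le; rw [pvColumn_length]; omega
    rw [h0]
    simp [bombaDown]
  | succ m ih =>
    intro h1 hle acc
    have hlt : a < t.length := by omega
    rw [PySem.List.pyRange_one_cons (by exact_mod_cast hlt)]
    simp only [bombaDown]
    by_cases haf : f + a < t.length
    · rw [if_pos (by push_cast; omega)]
      have hfa : (f : Int) + (a : Int) = ((f + a : Nat) : Int) := by push_cast; ring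
      have hcl : f + a < (pvColumn t j).length := by rw [pvColumn_length]; omega
      rw [hfa, pvCell_natCast t (f+a) j (by omega)]
      rw [List.drop_eq_getElem_cons hcl]
      by_cases hT : (pvColumn t j)[f+a]'hcl = "T"
      · rw [if_neg (by simp only [ne_eq, not_not]; exact hT)]
        simp [hT, pvNotT]
      · rw [if_pos (by simp only [ne_eq]; exact hT)]
        have hih := ih (a+1) (by omega) (by omega) (by omega) (acc + 1)
        push_cast at hih ⊢
        have e : f + (a + 1) = (f + a) + 1 := by omega
        rw [e] at hih
        rw [hih]
        have hp : pvNotT ((pvColumn t j)[f+a]'hcl) = true := by simp [pvNotT, hT]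
        rw [List.takeWhile_cons, if_pos hp]
        simp only [List.length_cons]
        push_cast
        omega
    · rw [if_neg (by push_cast; omega)]
      have hih := ih (a+1) (by omega) (by omega) (by omega) acc
      push_cast at hih ⊢
      rw [hih]
      have e1 : (pvColumn t j).drop (f + (a+1)) = [] := by
        apply List.drop_eq_nil_of_le; rw [pvColumn_length]; omega
      have e2 : (pvColumn t j).drop (f + a) = [] := by
        apply List.drop_eq_nil_of_le; rw [pvColumn_length]; omega
      rw [e1, e2]

theorem bombaRight_spec (t : List (List String)) (f j : Nat) (row : List String)
    (hget : t[f]? = some row) (hrow : row.length = t.length) :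
    ∀ a : Nat, 1 ≤ a → a ≤ t.length → ∀ acc : Int,
      bombaRight t (f : Int) (j : Int) (PySem.List.pyRange (a : Int) (t.length : Int) 1) acc =
        acc + (((row.drop (j + a)).takeWhile pvNotT).length : Int) := by
  intro a
  induction h : t.length - a generalizing a with
  | zero =>
    intro h1 hle acc
    have hr : PySem.List.pyRange (a : Int) (t.length : Int) 1 = [] := by
      have ha : a = t.length := by omega
      rw [ha]; simp [pysem]
    rw [hr]
    have h0 : row.drop (j + a) = [] := by
      apply List.drop_eq_nil_of_le; omega
    rw [h0]
    simp [bombaRight]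
  | succ m ih =>
    intro h1 hle acc
    have hlt : a < t.length := by omega
    rw [PySem.List.pyRange_one_cons (by exact_mod_cast hlt)]
    simp only [bombaRight]
    by_cases haf : j + a < t.length
    · rw [if_pos (by push_cast; omega)]
      have hja : (j : Int) + (a : Int) = ((j + a : Nat) : Int) := by push_cast; ring
      have hcl : j + a < row.length := by omega
      rw [hja, pvCell_row t f (j+a) row hget hcl]
      rw [List.drop_eq_getElem_cons hcl]
      by_cases hT : row[j+a]'hcl = "T"
      · rw [if_neg (by simp only [ne_eq, not_not]; exact hT)]
        simp [hT, pvNotT]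
      · rw [if_pos (by simp only [ne_eq]; exact hT)]
        have hih := ih (a+1) (by omega) (by omega) (by omega) (acc + 1)
        push_cast at hih ⊢
        have e : j + (a + 1) = (j + a) + 1 := by omega
        rw [e] at hih
        rw [hih]
        have hp : pvNotT (row[j+a]'hcl) = true := by simp [pvNotT, hT]
        rw [List.takeWhile_cons, if_pos hp]
        simp only [List.length_cons]
        push_cast; omega
    · rw [if_neg (by push_cast; omega)]
      have hih := ih (a+1) (by omega) (by omega) (by omega) acc
      push_cast at hih ⊢
      rw [hih]
      have e1 : row.drop (j + (a+1)) = [] := by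
        apply List.drop_eq_nil_of_le; omega
      have e2 : row.drop (j + a) = [] := by
        apply List.drop_eq_nil_of_le; omega
      rw [e1, e2]

theorem bombaLeft_spec (t : List (List String)) (f j : Nat) (row : List String)
    (hget : t[f]? = some row) (hj : j < t.length) (hrow : row.length = t.length) :
    ∀ a : Nat, 1 ≤ a → a ≤ t.length → ∀ acc : Int,
      bombaLeft t (f : Int) (j : Int) (PySem.List.pyRange (a : Int) (t.length : Int) 1) acc =
        acc + ((((row.take (j + 1 - a)).reverse).takeWhile pvNotT).length : Int) := by
  intro a
  induction h : t.length - a generalizing a with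
  | zero =>
    intro h1 hle acc
    have hr : PySem.List.pyRange (a : Int) (t.length : Int) 1 = [] := by
      have ha : a = t.length := by omega
      rw [ha]; simp [pysem]
    rw [hr]
    have h0 : j + 1 - a = 0 := by omega
    rw [h0]
    simp [bombaLeft]
  | succ m ih =>
    intro h1 hle acc
    have hlt : a < t.length := by omega
    rw [PySem.List.pyRange_one_cons (by exact_mod_cast hlt)]
    simp only [bombaLeft]
    by_cases haf : a ≤ j
    · rw [if_pos (by push_cast; omega)]
      have hja : (j : Int) - (a : Int) = ((j - a : Nat) : Int) := by push_cast; omega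
      have hcl : j - a < row.length := by omega
      rw [hja, pvCell_row t f (j-a) row hget hcl]
      have hfa2 : j + 1 - a = (j - a) + 1 := by omega
      rw [hfa2, take_rev_cons _ _ hcl]
      by_cases hT : row[j-a]'hcl = "T"
      · rw [if_neg (by simp only [ne_eq, not_not]; exact hT)]
        simp [hT, pvNotT]
      · rw [if_pos (by simp only [ne_eq]; exact hT)]
        have hih := ih (a+1) (by omega) (by omega) (by omega) (acc + 1)
        push_cast at hih ⊢
        rw [hih]
        have hfa3 : j + 1 - (a + 1) = j - a := by omega
        simp only [hfa3] at *
        have hp : pvNotT (row[j-a]'hcl) = true := by simp [pvNotT, hT]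
        rw [List.takeWhile_cons, if_pos hp]
        simp only [List.length_cons]
        push_cast; omega
    · rw [if_neg (by push_cast; omega)]
      have hih := ih (a+1) (by omega) (by omega) (by omega) acc
      push_cast at hih ⊢
      rw [hih]
      have e0 : j - a = 0 := by omega
      have e1 : j + 1 - (a + 1) = 0 := by omega
      have e2 : j + 1 - a = 0 := by omega
      simp only [e0, e1, e2]

-- A's per-bomb scan on a square board: 1 + the four maximal non-"T" runs around the cell
theorem bomba_square (t : List (List String)) (hsq : ∀ fila ∈ t, fila.length = t.length)
    (i j : Nat) (hi : i < t.length) (hj : j < t.length)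
    (hd : PySem.Str.strIsdigit (pvCell t (i : Int) (j : Int)) = true) :
    verificar_alcance_bomba t ((i : Int), (j : Int)) =
      1 + ((((pvColumn t j).take i).reverse.takeWhile pvNotT).length : Int)
        + ((((pvColumn t j).drop (i+1)).takeWhile pvNotT).length : Int)
        + ((((t[i]'hi).drop (j+1)).takeWhile pvNotT).length : Int)
        + ((((t[i]'hi).take j).reverse.takeWhile pvNotT).length : Int) := by
  have hget : t[i]? = some (t[i]'hi) := List.getElem?_eq_getElem hi
  have hrow : (t[i]'hi).length = t.length := hsq _ (List.getElem_mem hi)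
  have h1n : 1 ≤ t.length := by omega
  simp only [verificar_alcance_bomba]
  rw [hd, if_neg (by simp)]
  have hu := bombaUp_spec t i j hi 1 le_rfl h1n 1
  have hdn := bombaDown_spec t i j hi 1 le_rfl h1n
  have hr := bombaRight_spec t i j _ hget hrow 1 le_rfl h1n
  have hl := bombaLeft_spec t i j _ hget hj hrow 1 le_rfl h1n
  push_cast at hu hdn hr hl
  try simp only [Nat.add_sub_cancel] at hu hdn hr hl
  rw [hu, hdn, hr, hl]

-- A's inner loop with its early return is the conjunction of the per-cell checks
theorem vatbRow_eq_all (t : List (List String)) (i : Int) (js : List Int) :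
    vatbRow t i js = js.all (fun j => pvPA t i j) := by
  induction js with
  | nil => rfl
  | cons j rest ih =>
    simp only [vatbRow, List.all_cons]
    by_cases hd : PySem.Str.strIsdigit (pvCell t i j) = true
    · rw [if_pos hd]
      simp only [PySem.Str.strIsdigit_eq] at hd
      by_cases hne : verificar_alcance_bomba t (i, j) ≠ (PySem.Int.ofStr? (pvCell t i j)).getD 0
      · rw [if_pos hne]
        have hfalse : pvPA t i j = false := by
          have hbe : (verificar_alcance_bomba t (i, j) == (PySem.Int.ofStr? (pvCell t i j)).getD 0) = false := by
            simpa using hne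
          simp [pvPA, hd, hbe]
        simp [hfalse]
      · rw [if_neg hne]
        have htrue : pvPA t i j = true := by
          simp only [ne_eq, not_not] at hne
          simp [pvPA, hne]
        simp [htrue, ih]
    · rw [if_neg hd]
      simp only [Bool.not_eq_true, PySem.Str.strIsdigit_eq] at hd
      have htrue : pvPA t i j = true := by
        simp [pvPA, hd]
      simp [htrue, ih]

theorem vatbRows_eq_all (t : List (List String)) (is : List Int) :
    vatbRows t is =
      is.all (fun i => vatbRow t i
        (PySem.List.pyRange 0 ((((PySem.List.pyGet? t 0).getD []).length : Int)) 1)) := by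
  induction is with
  | nil => rfl
  | cons i rest ih =>
    simp only [vatbRows, List.all_cons]
    split
    · rename_i h
      simp [h, ih]
    · rename_i h
      simp only [Bool.not_eq_true] at h
      simp [h]

theorem pyRange_zero_map (n : Nat) :
    PySem.List.pyRange 0 (n : Int) 1 = (List.range n).map (fun k => (k : Int)) := by
  rw [PySem.List.pyRange_zero_natCast]
  induction n with
  | zero => rfl
  | succ k ih => simp [List.range_succ, ih]

theorem getD_map_lt {α β : Type} [Inhabited β] (l : List α) (g : α → β) (i : Nat)
    (h : i < l.length) (d : β) : (l.map g).getD i d = g (l[i]'h) := by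
  simp [List.getD_eq_getElem?_getD, List.getElem?_eq_getElem h]

theorem getD_reverse {α : Type} (l : List α) (j : Nat) (h : j < l.length) (d : α) :
    l.reverse.getD j d = l.getD (l.length - 1 - j) d := by
  simp [List.getD_eq_getElem?_getD, List.getElem?_reverse h,
    List.getElem?_eq_getElem (show l.length - 1 - j < l.length by omega)]

theorem rev_take_rev {α : Type} (l : List α) (k : Nat) (h : k ≤ l.length) :
    (l.reverse.take k).reverse = l.drop (l.length - k) := by
  rw [List.take_reverse]; simp

-- A as a double conjunction over the index ranges
theorem pvA_eq_all (t : List (List String)) :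
    verificar_alcance_todas_bombas t =
      (List.range t.length).all (fun i =>
        (List.range ((PySem.List.pyGet? t 0).getD []).length).all (fun j =>
          pvPA t (i : Int) (j : Int))) := by
  unfold verificar_alcance_todas_bombas
  simp only [vatbRows_eq_all, vatbRow_eq_all, pyRange_zero_map, List.all_map]
  simp [Function.comp, List.all_eq_true]

theorem pvColumn_eq_range (t : List (List String)) (j : Nat) :
    (List.range t.length).map (fun i => (t.getD i []).getD j "") = pvColumn t j := by
  unfold pvColumn
  apply List.ext_getElem
  · simp
  · intro k h1 h2
    simp only [List.getElem_map, List.getElem_range]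
    simp [List.getD_eq_getElem?_getD,
      List.getElem?_eq_getElem (show k < t.length by simpa using h2)]
theorem pvAllAll_congr (n m : Nat) (p q : Nat → Nat → Bool)
    (h : ∀ i < n, ∀ j < m, p i j = q i j) :
    ((List.range n).all fun i => (List.range m).all fun j => p i j) =
    ((List.range n).all fun i => (List.range m).all fun j => q i j) := by
  rw [Bool.eq_iff_iff]
  simp only [List.all_eq_true, List.mem_range]
  constructor
  · intro H i hi j hj; rw [← h i hi j hj]; exact H i hi j hj
  · intro H i hi j hj; rw [h i hi j hj]; exact H i hi j hj

theorem pvIntBeq_comm (x y : Int) : (x == y) = (y == x) := by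
  by_cases h : x = y
  · simp [h]
  · have h' : ¬ y = x := fun hh => h hh.symm
    simp [h, h']

-- ===== VERDICT (by name: the statement is the Claim_ definition above) =====
theorem verificar_alcance_todas_bombas_spec : Claim_equal_verificar_alcance_todas_bombas := by
  intro t _hdom hpre
  unfold Spec_verificar_alcance_todas_bombas
  by_cases hn0 : t.length = 0
  · have ht : t = [] := List.length_eq_zero_iff.mp hn0
    subst ht
    decide
  · have h0lt : 0 < t.length := Nat.pos_of_ne_zero hn0
    have hm0 : (PySem.List.pyGet? t 0).getD [] = t[0]'h0lt := by
      have hg := PySem.List.pyGet?_ofNat t 0 h0lt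
      norm_num at hg
      rw [hg]
      rfl
    have hhead : t.headD [] = t[0]'h0lt := by
      cases t with
      | nil => simp at hn0
      | cons r rest => rfl
    rcases hpre with hsq | ⟨hlen, hnod⟩
    · -- square board
      have hm : (t[0]'h0lt).length = t.length := hsq _ (List.getElem_mem h0lt)
      rw [pvA_eq_all, hm0, hm]
      simp only [verificar_alcance_todas_bombas_alt]
      rw [if_neg hn0, hhead, hm]
      have hrows : t.map (fun fila => PySem.List.slice fila none (some (t.length : Int))) = t := by
        have hcong : ∀ fila ∈ t, PySem.List.slice fila none (some (t.length : Int)) = id fila := by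
          intro fila hfm
          rw [PySem.List.slice_to_natCast]
          exact List.take_of_length_le (le_of_eq (hsq fila hfm))
        rw [List.map_congr_left hcong, List.map_id]
      rw [hrows]
      have hcols : (List.range t.length).map (fun j =>
          (List.range t.length).map (fun i => (t.getD i []).getD j "")) =
          (List.range t.length).map (fun j => pvColumn t j) :=
        List.map_congr_left (fun j _ => pvColumn_eq_range t j)
      rw [hcols, List.map_map, List.map_map]
      apply pvAllAll_congr
      intro i hi j hj
      have hrowlen : (t[i]'hi).length = t.length := hsq _ (List.getElem_mem hi)
      have hj' : j < (t[i]'hi).length := by omega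
      have hget : t[i]? = some (t[i]'hi) := List.getElem?_eq_getElem hi
      have hcell : pvCell t (i : Int) (j : Int) = (t[i]'hi)[j]'hj' := pvCell_row t i j _ hget hj'
      have hti : t.getD i [] = t[i]'hi := by
        simp [List.getD_eq_getElem?_getD, List.getElem?_eq_getElem hi]
      have hs : (t.getD i []).getD j "" = (t[i]'hi)[j]'hj' := by
        rw [hti]
        simp [List.getD_eq_getElem?_getD, List.getElem?_eq_getElem hj']
      have hcollen : (pvColumn t j).length = t.length := pvColumn_length t j
      -- the four table lookups
      have hgetL : (t.map (fun r => runsBefore r 0)).getD i [] = runsBefore (t[i]'hi) 0 :=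
        getD_map_lt t _ i hi []
      have hgetR : (t.map (fun r => (runsBefore r.reverse 0).reverse)).getD i [] =
          (runsBefore (t[i]'hi).reverse 0).reverse := getD_map_lt t _ i hi []
      have hgetU : ((List.range t.length).map ((fun c => runsBefore c 0) ∘
          (fun j => pvColumn t j))).getD j [] = runsBefore (pvColumn t j) 0 := by
        rw [getD_map_lt _ _ j (by simpa using hj) []]
        simp
      have hgetD : ((List.range t.length).map ((fun c => (runsBefore c.reverse 0).reverse) ∘
          (fun j => pvColumn t j))).getD j [] = (runsBefore (pvColumn t j).reverse 0).reverse := by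
        rw [getD_map_lt _ _ j (by simpa using hj) []]
        simp
      rw [hgetL, hgetR, hgetU, hgetD]
      have hL : (runsBefore (t[i]'hi) 0).getD j 0 =
          (((((t[i]'hi).take j).reverse).takeWhile pvNotT).length : Int) :=
        runsBefore_getD_zero _ j hj'
      have hR : ((runsBefore (t[i]'hi).reverse 0).reverse).getD j 0 =
          ((((t[i]'hi).drop (j+1)).takeWhile pvNotT).length : Int) := by
        rw [getD_reverse _ j (by rw [runsBefore_length, List.length_reverse]; omega) 0]
        rw [runsBefore_length, List.length_reverse]
        rw [runsBefore_getD_zero _ _ (by rw [List.length_reverse]; omega)]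
        rw [rev_take_rev _ _ (by omega)]
        have harith : (t[i]'hi).length - ((t[i]'hi).length - 1 - j) = j + 1 := by omega
        rw [harith]
      have hU : (runsBefore (pvColumn t j) 0).getD i 0 =
          ((((pvColumn t j).take i).reverse.takeWhile pvNotT).length : Int) :=
        runsBefore_getD_zero _ i (by omega)
      have hD : ((runsBefore (pvColumn t j).reverse 0).reverse).getD i 0 =
          ((((pvColumn t j).drop (i+1)).takeWhile pvNotT).length : Int) := by
        rw [getD_reverse _ i (by rw [runsBefore_length, List.length_reverse]; omega) 0]
        rw [runsBefore_length, List.length_reverse]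
        rw [runsBefore_getD_zero _ _ (by rw [List.length_reverse]; omega)]
        rw [rev_take_rev _ _ (by omega)]
        have harith : (pvColumn t j).length - ((pvColumn t j).length - 1 - i) = i + 1 := by omega
        rw [harith]
      rw [hL, hR, hU, hD]
      unfold pvPA
      rw [hcell, hs]
      by_cases hdig : PySem.Str.strIsdigit ((t[i]'hi)[j]'hj') = true
      · have halc : verificar_alcance_bomba t ((i : Int), (j : Int)) =
            1 + ((((pvColumn t j).take i).reverse.takeWhile pvNotT).length : Int)
              + ((((pvColumn t j).drop (i+1)).takeWhile pvNotT).length : Int)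
              + ((((t[i]'hi).drop (j+1)).takeWhile pvNotT).length : Int)
              + ((((t[i]'hi).take j).reverse.takeWhile pvNotT).length : Int) :=
          bomba_square t hsq i j hi hj (by rw [hcell]; exact hdig)
        rw [halc, pvIntBeq_comm]
        have hre : (1 + ((((pvColumn t j).take i).reverse.takeWhile pvNotT).length : Int)
              + ((((pvColumn t j).drop (i+1)).takeWhile pvNotT).length : Int)
              + ((((t[i]'hi).drop (j+1)).takeWhile pvNotT).length : Int)
              + ((((t[i]'hi).take j).reverse.takeWhile pvNotT).length : Int)) =
            (1 + ((((t[i]'hi).take j).reverse.takeWhile pvNotT).length : Int)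
              + ((((t[i]'hi).drop (j+1)).takeWhile pvNotT).length : Int)
              + ((((pvColumn t j).take i).reverse.takeWhile pvNotT).length : Int)
              + ((((pvColumn t j).drop (i+1)).takeWhile pvNotT).length : Int)) := by ring
        rw [hre]
      · have hdig' : PySem.Str.strIsdigit ((t[i]'hi)[j]'hj') = false := by
          simpa using hdig
        rw [hdig']
        simp
    · -- board without digit cells: both sides are True
      have hA : verificar_alcance_todas_bombas t = true := by
        rw [pvA_eq_all]
        simp only [List.all_eq_true, List.mem_range]
        intro i hi j hj
        rw [hm0] at hj
        have hrowlen : (t[0]'h0lt).length ≤ (t[i]'hi).length := by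
          rw [← hhead]; exact hlen _ (List.getElem_mem hi)
        have hj' : j < (t[i]'hi).length := by omega
        have hget : t[i]? = some (t[i]'hi) := List.getElem?_eq_getElem hi
        have hcell : pvCell t (i : Int) (j : Int) = (t[i]'hi)[j]'hj' := pvCell_row t i j _ hget hj'
        have hnd : PySem.Str.strIsdigit ((t[i]'hi)[j]'hj') = false :=
          hnod _ (List.getElem_mem hi) _ (List.getElem_mem hj')
        unfold pvPA
        rw [hcell, hnd]
        simp
      have hB : verificar_alcance_todas_bombas_alt t = true := by
        simp only [verificar_alcance_todas_bombas_alt]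
        rw [if_neg hn0]
        simp only [List.all_eq_true, List.mem_range]
        intro i hi j hj
        have hgd : (t.map (fun fila =>
            PySem.List.slice fila none (some ((t.headD []).length : Int)))).getD i [] =
            (t[i]'hi).take (t.headD []).length := by
          rw [getD_map_lt _ _ i hi []]
          rw [PySem.List.slice_to_natCast]
        rw [hgd]
        have hmle : (t.headD []).length ≤ (t[i]'hi).length := by
          rw [hhead, ← hhead]; exact hlen _ (List.getElem_mem hi)
        have hj' : j < (t[i]'hi).length := by omega
        have hjt : j < ((t[i]'hi).take (t.headD []).length).length := by
          rw [List.length_take]; omega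
        have hs : ((t[i]'hi).take (t.headD []).length).getD j "" = (t[i]'hi)[j]'hj' := by
          rw [List.getD_eq_getElem?_getD, List.getElem?_eq_getElem hjt, List.getElem_take]
          rfl
        rw [hs]
        have hnd : PySem.Str.strIsdigit ((t[i]'hi)[j]'hj') = false :=
          hnod _ (List.getElem_mem hi) _ (List.getElem_mem hj')
        rw [hnd]
        simp
      rw [hA, hB]
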